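-- pv_equiv track=rewrite | github.com/lorens1912-tech/ai_orchestrator_scaffold | archive/legacy_p/20260213_035334/p26_hotfix_main.py | _fix_if_try_indent
-- ===== SOURCE A (Python) =====
-- def _fix_if_try_indent(s: str):
--     lines = s.splitlines()
--     mod = False
--     i = 0
--     n = len(lines)
--     while i < n:
--         line = lines[i]
--         stripped = line.lstrip(" ")
--         if stripped.startswith("if ") and stripped.rstrip().endswith(":"):
--             if_indent = len(line) - len(stripped)
--             j = i + 1
--             while j < n and lines[j].strip() == "":
--                 j += 1
--             if j < n:
--                 sj = lines[j].lstrip(" ")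
--                 indj = len(lines[j]) - len(sj)
--                 if indj <= if_indent and sj.startswith("try:"):
--                     k = j
--                     while k < n:
--                         cur = lines[k]
--                         sc = cur.strip()
--                         ind = len(cur) - len(cur.lstrip(" "))
--                         if k > j and sc and ind <= if_indent and not sc.startswith(("except", "finally")):
--                             break
--                         if sc:
--                             lines[k] = (" " * 4) + cur
--                         k += 1
--                     mod = True
--                     i = k
--                     continue
--         i += 1
--     out = "\n".join(lines)
--     if s.endswith("\n"):
--         out += "\n"
--     return out, mod
-- ===== SOURCE B (Python) =====
-- def _fix_if_try_indent(s: str):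
--     # Single forward pass with a 3-state machine (scan / pending-try / in-body);
--     # no cursor jumps, no in-place mutation, each line visited exactly once.
--     out = []
--     found = False
--     mode = "scan"
--     hdr = 0
--     for line in s.splitlines():
--         st = line.lstrip(" ")
--         sc = line.strip()
--         ind = len(line) - len(st)
--         if mode == "body":
--             if sc and ind <= hdr and not sc.startswith(("except", "finally")):
--                 mode = "scan"
--             else:
--                 out.append("    " + line if sc else line)
--                 continue
--         if mode == "pend":
--             if not sc:
--                 out.append(line)
--                 continue
--             if ind <= hdr and st.startswith("try:"):
--                 out.append("    " + line)
--                 found = True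
--                 mode = "body"
--                 continue
--             mode = "scan"
--         if st.startswith("if ") and st.rstrip().endswith(":"):
--             hdr = ind
--             mode = "pend"
--         out.append(line)
--     res = "\n".join(out)
--     if s.endswith("\n"):
--         res += "\n"
--     return res, found
-- ===== Notes on version B (the rewrite author's own statement) =====
-- stated objective: alternative
-- what changed: A uses three nested while loops with cursor jumps over a mutable line array (skip blanks, walk the try block in place, resume at the break index); B is a single forward pass over the lines with an explicit three-state machine (scan / pending-try / in-body) that visits each line exactly once and appends to an output list, with no mutation and no index arithmetic.
import Mathlib
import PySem

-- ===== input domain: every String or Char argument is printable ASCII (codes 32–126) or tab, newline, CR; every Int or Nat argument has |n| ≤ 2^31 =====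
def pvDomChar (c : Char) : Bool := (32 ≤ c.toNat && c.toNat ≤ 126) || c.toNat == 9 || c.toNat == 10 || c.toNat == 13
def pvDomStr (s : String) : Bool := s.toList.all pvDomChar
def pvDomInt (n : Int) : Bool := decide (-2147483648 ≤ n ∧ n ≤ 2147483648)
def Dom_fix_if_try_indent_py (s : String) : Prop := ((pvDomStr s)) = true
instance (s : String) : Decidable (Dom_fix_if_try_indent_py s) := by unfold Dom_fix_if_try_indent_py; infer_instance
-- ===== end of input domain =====

-- B replaces A's three nested cursor loops over a mutable line array by a single forward pass
-- with an explicit three-state machine, visiting each line exactly once (objective: alternative).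

-- shared primitive: exact hand port of str.lstrip(" ") (strip leading SPACE characters only)
def pyLstripSpace (cs : List Char) : List Char := cs.dropWhile (fun c => c == ' ')

-- ===== PORT A =====
-- A mutates `lines` in place; the ported loops thread the list through as state.
def aSkipBlank (lines : List (List Char)) (j n : Nat) : Nat :=
  if hj : j < n then
    if PySem.Chars.strip (lines.getD j []) = [] then aSkipBlank lines (j + 1) n else j
  else j
termination_by n - j
decreasing_by exact Nat.sub_succ_lt_self _ _ hj

-- inner `while k < n` loop of A: indents non-blank lines in place, returns (lines, k)
def aInner (lines : List (List Char)) (j ifInd k n : Nat) : List (List Char) × Nat :=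
  if hk : k < n then
    let cur := lines.getD k []
    let sc := PySem.Chars.strip cur
    let ind := cur.length - (pyLstripSpace cur).length
    if j < k ∧ sc ≠ [] ∧ ind ≤ ifInd ∧ PySem.Chars.startswith sc "except".toList = false ∧
        PySem.Chars.startswith sc "finally".toList = false then
      (lines, k)
    else
      aInner (if sc ≠ [] then lines.set k ("    ".toList ++ cur) else lines) j ifInd (k + 1) n
  else (lines, k)
termination_by n - k
decreasing_by exact Nat.sub_succ_lt_self _ _ hk

lemma aInner_le (lines : List (List Char)) (j ifInd k n : Nat) :
    k ≤ (aInner lines j ifInd k n).2 := by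
  rw [aInner]
  dsimp only
  split
  · split
    · exact le_refl _
    · exact le_trans (Nat.le_succ k) (aInner_le _ j ifInd (k + 1) n)
  · exact le_refl _
termination_by n - k

lemma aSkipBlank_le (lines : List (List Char)) (j n : Nat) : j ≤ aSkipBlank lines j n := by
  rw [aSkipBlank]
  split
  · split
    · exact le_trans (Nat.le_succ j) (aSkipBlank_le _ (j + 1) n)
    · exact le_refl _
  · exact le_refl _
termination_by n - j

-- outer `while i < n` loop of A
def aOuter (lines : List (List Char)) (mod : Bool) (i n : Nat) : List (List Char) × Bool :=
  if hi : i < n then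
    let line := lines.getD i []
    let stripped := pyLstripSpace line
    if PySem.Chars.startswith stripped "if ".toList = true ∧
        PySem.Chars.endswith (PySem.Chars.rstrip stripped) ":".toList = true then
      let ifInd := line.length - stripped.length
      let j := aSkipBlank lines (i + 1) n
      if hj : j < n then
        let lj := lines.getD j []
        let sj := pyLstripSpace lj
        if lj.length - sj.length ≤ ifInd ∧ PySem.Chars.startswith sj "try:".toList = true then
          let r := aInner lines j ifInd j n
          aOuter r.1 true r.2 n
        else aOuter lines mod (i + 1) n
      else aOuter lines mod (i + 1) n
    else aOuter lines mod (i + 1) n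
  else (lines, mod)
termination_by n - i
decreasing_by
  · exact Nat.sub_lt_sub_left hi (Nat.lt_of_lt_of_le (Nat.lt_succ_self i)
      (Nat.le_trans (aSkipBlank_le lines (i + 1) n)
        (aInner_le lines (aSkipBlank lines (i + 1) n)
          ((lines.getD i []).length - (pyLstripSpace (lines.getD i [])).length)
          (aSkipBlank lines (i + 1) n) n)))
  all_goals exact Nat.sub_succ_lt_self _ _ hi

def fix_if_try_indent_py (s : String) : String × Bool :=
  let lines := PySem.Chars.splitlines s.toList
  let r := aOuter lines false 0 lines.length
  let out := PySem.Chars.join "\n".toList r.1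
  (String.ofList (if PySem.Chars.endswith s.toList "\n".toList = true then out ++ "\n".toList else out), r.2)

-- ===== PORT B =====
-- B's state machine: scan (looking for an `if …:` header), pend h (header seen, skipping
-- blanks, waiting for the `try:` line), body h (inside the region to indent)
inductive BMode where
  | scan : BMode
  | pend : Nat → BMode
  | body : Nat → BMode
deriving DecidableEq, Repr

structure BSt where
  out : List (List Char)
  found : Bool
  mode : BMode
deriving DecidableEq, Repr

-- one line of Source B's for-loop body (the `continue`-cascade, in order: body, pend, scan)
def bStep (st : BSt) (line : List Char) : BSt :=
  let stl := pyLstripSpace line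
  let sc := PySem.Chars.strip line
  let ind := line.length - stl.length
  let scanStep : BSt → BSt := fun s =>
    if PySem.Chars.startswith stl "if ".toList = true ∧
        PySem.Chars.endswith (PySem.Chars.rstrip stl) ":".toList = true then
      { s with mode := BMode.pend ind, out := s.out ++ [line] }
    else { s with out := s.out ++ [line] }
  match st.mode with
  | BMode.body hdr =>
      if sc ≠ [] ∧ ind ≤ hdr ∧ PySem.Chars.startswith sc "except".toList = false ∧
          PySem.Chars.startswith sc "finally".toList = false then
        scanStep { st with mode := BMode.scan }
      else { st with out := st.out ++ [if sc ≠ [] then "    ".toList ++ line else line] }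
  | BMode.pend hdr =>
      if sc = [] then { st with out := st.out ++ [line] }
      else if ind ≤ hdr ∧ PySem.Chars.startswith stl "try:".toList = true then
        { out := st.out ++ ["    ".toList ++ line], found := true, mode := BMode.body hdr }
      else scanStep { st with mode := BMode.scan }
  | BMode.scan => scanStep st

def fix_if_try_indent_py_alt (s : String) : String × Bool :=
  let lines := PySem.Chars.splitlines s.toList
  let fin := lines.foldl bStep ⟨[], false, BMode.scan⟩
  let res := PySem.Chars.join "\n".toList fin.out
  (String.ofList (if PySem.Chars.endswith s.toList "\n".toList = true then res ++ "\n".toList else res), fin.found)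

-- ===== PRECONDITION & SPEC =====
def Spec_fix_if_try_indent_py (s : String) (out : String × Bool) : Prop := out = fix_if_try_indent_py_alt s
instance (s : String) (out : String × Bool) : Decidable (Spec_fix_if_try_indent_py s out) := by unfold Spec_fix_if_try_indent_py; infer_instance

-- ===== CLAIM (what is proved, stated in full; the proofs are below) =====
def Claim_equal_fix_if_try_indent_py : Prop := ∀ (s : String), Dom_fix_if_try_indent_py s → Spec_fix_if_try_indent_py s (fix_if_try_indent_py s)

-- ===== LEMMAS AND PROOFS =====

-- proof-side descriptions of A's two cursor-search loops over the ORIGINAL lines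
def bNextNonblank (orig : List (List Char)) (j : Nat) : Nat :=
  if hj : j < orig.length then
    if PySem.Chars.strip (orig.getD j []) = [] then bNextNonblank orig (j + 1) else j
  else j
termination_by orig.length - j
decreasing_by exact Nat.sub_succ_lt_self _ _ hj

def bRegionEnd (orig : List (List Char)) (ifInd k : Nat) : Nat :=
  if hk : k < orig.length then
    let cur := orig.getD k []
    let sc := PySem.Chars.strip cur
    let ind := cur.length - (pyLstripSpace cur).length
    if sc ≠ [] ∧ ind ≤ ifInd ∧ PySem.Chars.startswith sc "except".toList = false ∧
        PySem.Chars.startswith sc "finally".toList = false then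
      k
    else bRegionEnd orig ifInd (k + 1)
  else k
termination_by orig.length - k
decreasing_by exact Nat.sub_succ_lt_self _ _ hk

-- the per-line transform B applies inside a region
def indLine (l : List Char) : List Char :=
  if PySem.Chars.strip l ≠ [] then "    ".toList ++ l else l

lemma bNextNonblank_le (orig : List (List Char)) (j : Nat) : j ≤ bNextNonblank orig j := by
  rw [bNextNonblank]
  split
  · split
    · exact le_trans (Nat.le_succ j) (bNextNonblank_le _ (j + 1))
    · exact le_refl _
  · exact le_refl _
termination_by orig.length - j

lemma bNextNonblank_le_length (orig : List (List Char)) (j : Nat) (h : j ≤ orig.length) :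
    bNextNonblank orig j ≤ orig.length := by
  rw [bNextNonblank]
  by_cases hj : j < orig.length
  · rw [dif_pos hj]
    by_cases hb : PySem.Chars.strip (orig.getD j []) = []
    · rw [if_pos hb]; exact bNextNonblank_le_length orig (j + 1) hj
    · rw [if_neg hb]; exact h
  · rw [dif_neg hj]; exact h
termination_by orig.length - j
decreasing_by omega

lemma bNextNonblank_blank (orig : List (List Char)) (j t : Nat) (h1 : j ≤ t)
    (h2 : t < bNextNonblank orig j) : PySem.Chars.strip (orig.getD t []) = [] := by
  rw [bNextNonblank] at h2
  by_cases hj : j < orig.length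
  · rw [dif_pos hj] at h2
    by_cases hb : PySem.Chars.strip (orig.getD j []) = []
    · rw [if_pos hb] at h2
      by_cases ht : t = j
      · exact ht ▸ hb
      · exact bNextNonblank_blank orig (j + 1) t (by omega) h2
    · rw [if_neg hb] at h2; omega
  · rw [dif_neg hj] at h2; omega
termination_by orig.length - j
decreasing_by omega

lemma bNextNonblank_nonblank (orig : List (List Char)) (j : Nat)
    (h : bNextNonblank orig j < orig.length) :
    PySem.Chars.strip (orig.getD (bNextNonblank orig j) []) ≠ [] := by
  rw [bNextNonblank] at h ⊢
  by_cases hj : j < orig.length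
  · rw [dif_pos hj] at h ⊢
    by_cases hb : PySem.Chars.strip (orig.getD j []) = []
    · rw [if_pos hb] at h ⊢; exact bNextNonblank_nonblank orig (j + 1) h
    · rw [if_neg hb] at h ⊢; exact hb
  · rw [dif_neg hj] at h; omega
termination_by orig.length - j
decreasing_by omega

lemma bRegionEnd_le (orig : List (List Char)) (ifInd k : Nat) : k ≤ bRegionEnd orig ifInd k := by
  rw [bRegionEnd]
  dsimp only
  split
  · split
    · exact le_refl _
    · exact le_trans (Nat.le_succ k) (bRegionEnd_le _ ifInd (k + 1))
  · exact le_refl _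
termination_by orig.length - k

lemma bRegionEnd_le_length (orig : List (List Char)) (ifInd k : Nat) (h : k ≤ orig.length) :
    bRegionEnd orig ifInd k ≤ orig.length := by
  rw [bRegionEnd]
  dsimp only
  by_cases hk : k < orig.length
  · rw [dif_pos hk]
    split
    · exact h
    · exact bRegionEnd_le_length orig ifInd (k + 1) hk
  · rw [dif_neg hk]; exact h
termination_by orig.length - k
decreasing_by omega

lemma blank_all_isspace (l : List Char) (h : PySem.Chars.strip l = []) :
    ∀ c ∈ l, PySem.Chars.isspace c = true := by
  intro c hc
  unfold PySem.Chars.strip PySem.Chars.rstrip PySem.Chars.lstrip at h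
  rw [List.reverse_eq_nil_iff, List.dropWhile_eq_nil_iff] at h
  by_cases hcd : c ∈ List.dropWhile PySem.Chars.isspace l
  · exact h c (List.mem_reverse.mpr hcd)
  · have hsplit := List.takeWhile_append_dropWhile (p := PySem.Chars.isspace) (l := l)
    have hc' : c ∈ List.takeWhile PySem.Chars.isspace l := by
      rcases List.mem_append.mp (by rw [hsplit]; exact hc) with h1 | h2
      · exact h1
      · exact absurd h2 hcd
    exact List.mem_takeWhile_imp hc'

lemma blank_not_hdr (l : List Char) (h : PySem.Chars.strip l = []) :
    ¬ (PySem.Chars.startswith (pyLstripSpace l) "if ".toList = true ∧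
       PySem.Chars.endswith (PySem.Chars.rstrip (pyLstripSpace l)) ":".toList = true) := by
  rintro ⟨h1, -⟩
  rw [PySem.Chars.startswith_iff] at h1
  obtain ⟨t, ht⟩ := h1
  have hmem : 'i' ∈ l := by
    have hi : 'i' ∈ pyLstripSpace l := by rw [← ht]; simp
    exact (List.dropWhile_sublist _).mem hi
  exact absurd (blank_all_isspace l h 'i' hmem) (by decide)

lemma getD_append_drop (out orig : List (List Char)) (i t : Nat) (hlen : out.length = i)
    (hit : i ≤ t) : (out ++ orig.drop i).getD t [] = orig.getD t [] := by
  rw [List.getD_eq_getElem?_getD, List.getD_eq_getElem?_getD]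
  rw [List.getElem?_append_right (by omega), List.getElem?_drop]
  have he : i + (t - out.length) = t := by omega
  rw [he]

lemma skip_eq (out orig : List (List Char)) (i j : Nat) (hlen : out.length = i)
    (hij : i ≤ j) : aSkipBlank (out ++ orig.drop i) j orig.length = bNextNonblank orig j := by
  rw [aSkipBlank, bNextNonblank]
  by_cases hj : j < orig.length
  · rw [dif_pos hj, dif_pos hj, getD_append_drop out orig i j hlen hij]
    by_cases hb : PySem.Chars.strip (orig.getD j []) = []
    · rw [if_pos hb, if_pos hb]
      exact skip_eq out orig i (j + 1) hlen (by omega)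
    · rw [if_neg hb, if_neg hb]
  · rw [dif_neg hj, dif_neg hj]
termination_by orig.length - j
decreasing_by omega

lemma aOuter_skip_blanks (lines : List (List Char)) (mod : Bool) (i j n : Nat)
    (hij : i ≤ j) (hjn : j ≤ n)
    (hb : ∀ t, i ≤ t → t < j → PySem.Chars.strip (lines.getD t []) = []) :
    aOuter lines mod i n = aOuter lines mod j n := by
  rcases Nat.eq_or_lt_of_le hij with he | hlt
  · rw [he]
  · have hi : i < n := by omega
    conv_lhs => rw [aOuter]
    dsimp only
    rw [dif_pos hi, if_neg (blank_not_hdr _ (hb i le_rfl hlt))]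
    exact aOuter_skip_blanks lines mod (i + 1) j n (by omega) hjn
      (fun t ht1 ht2 => hb t (by omega) ht2)
termination_by j - i
decreasing_by omega

-- the break/stop condition of A's inner loop and of B's body state, on the original lines
def brkCond (orig : List (List Char)) (ifInd t : Nat) : Prop :=
  PySem.Chars.strip (orig.getD t []) ≠ [] ∧
  (orig.getD t []).length - (pyLstripSpace (orig.getD t [])).length ≤ ifInd ∧
  PySem.Chars.startswith (PySem.Chars.strip (orig.getD t [])) "except".toList = false ∧
  PySem.Chars.startswith (PySem.Chars.strip (orig.getD t [])) "finally".toList = false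

lemma bRegionEnd_stop (orig : List (List Char)) (ifInd k : Nat) (hk : k < orig.length)
    (hc : brkCond orig ifInd k) : bRegionEnd orig ifInd k = k := by
  unfold brkCond at hc
  rw [bRegionEnd]; dsimp only; rw [dif_pos hk, if_pos hc]

lemma bRegionEnd_step (orig : List (List Char)) (ifInd k : Nat) (hk : k < orig.length)
    (hc : ¬ brkCond orig ifInd k) :
    bRegionEnd orig ifInd k = bRegionEnd orig ifInd (k + 1) := by
  unfold brkCond at hc
  conv_lhs => rw [bRegionEnd]
  dsimp only; rw [dif_pos hk, if_neg hc]

lemma bRegionEnd_stopAll (orig : List (List Char)) (ifInd k : Nat) (hk : ¬ k < orig.length) :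
    bRegionEnd orig ifInd k = k := by
  rw [bRegionEnd]; dsimp only; rw [dif_neg hk]

lemma drop_cons_getD (orig : List (List Char)) (k : Nat) (hk : k < orig.length) :
    orig.drop k = orig.getD k [] :: orig.drop (k + 1) := by
  rw [List.getD_eq_getElem _ _ hk]
  exact List.drop_eq_getElem_cons hk

lemma set_boundary (out : List (List Char)) (c v : List Char) (rest : List (List Char)) :
    (out ++ c :: rest).set out.length v = (out ++ [v]) ++ rest := by
  rw [List.set_append]
  simp

lemma aInner_corr (orig out : List (List Char)) (j hdr k : Nat) (hlen : out.length = k)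
    (hjk : j < k) :
    aInner (out ++ orig.drop k) j hdr k orig.length =
      (out ++ ((orig.drop k).take (bRegionEnd orig hdr k - k)).map indLine ++
         orig.drop (bRegionEnd orig hdr k), bRegionEnd orig hdr k) := by
  rw [aInner]
  dsimp only
  by_cases hk : k < orig.length
  · rw [dif_pos hk, getD_append_drop out orig k k hlen le_rfl]
    by_cases hbrk : brkCond orig hdr k
    · rw [if_pos ⟨hjk, hbrk.1, hbrk.2.1, hbrk.2.2.1, hbrk.2.2.2⟩, bRegionEnd_stop orig hdr k hk hbrk]
      simp
    · have hbrk' : ¬ (j < k ∧ PySem.Chars.strip (orig.getD k []) ≠ [] ∧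
          (orig.getD k []).length - (pyLstripSpace (orig.getD k [])).length ≤ hdr ∧
          PySem.Chars.startswith (PySem.Chars.strip (orig.getD k [])) "except".toList = false ∧
          PySem.Chars.startswith (PySem.Chars.strip (orig.getD k [])) "finally".toList = false) := by
        intro hc
        exact hbrk ⟨hc.2.1, hc.2.2.1, hc.2.2.2.1, hc.2.2.2.2⟩
      rw [if_neg hbrk']
      have hE : bRegionEnd orig hdr k = bRegionEnd orig hdr (k + 1) :=
        bRegionEnd_step orig hdr k hk hbrk
      have hdropk := drop_cons_getD orig k hk
      have hset : (if PySem.Chars.strip (orig.getD k []) ≠ [] then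
            (out ++ orig.drop k).set k ("    ".toList ++ orig.getD k []) else out ++ orig.drop k) =
          (out ++ [indLine (orig.getD k [])]) ++ orig.drop (k + 1) := by
        unfold indLine
        by_cases hnb : PySem.Chars.strip (orig.getD k []) ≠ []
        · rw [if_pos hnb, if_pos hnb, hdropk, ← hlen, set_boundary]
        · rw [if_neg hnb, if_neg hnb, hdropk]
          simp
      rw [hset]
      rw [aInner_corr orig (out ++ [indLine (orig.getD k [])]) j hdr (k + 1)
        (by simp [hlen]) (by omega)]
      have hE1 : k + 1 ≤ bRegionEnd orig hdr (k + 1) := bRegionEnd_le orig hdr (k + 1)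
      have htake : (orig.drop k).take (bRegionEnd orig hdr (k + 1) - k) =
          orig.getD k [] :: (orig.drop (k + 1)).take (bRegionEnd orig hdr (k + 1) - (k + 1)) := by
        rw [hdropk]
        have : bRegionEnd orig hdr (k + 1) - k = (bRegionEnd orig hdr (k + 1) - (k + 1)) + 1 := by
          omega
        rw [this, List.take_succ_cons]
      rw [hE, htake]
      simp
  · rw [dif_neg hk, bRegionEnd_stopAll orig hdr k hk]
    simp
termination_by orig.length - k
decreasing_by omega

lemma bStep_body_break (out : List (List Char)) (f : Bool) (hdr : Nat) (c : List Char)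
    (hc : PySem.Chars.strip c ≠ [] ∧ c.length - (pyLstripSpace c).length ≤ hdr ∧
      PySem.Chars.startswith (PySem.Chars.strip c) "except".toList = false ∧
      PySem.Chars.startswith (PySem.Chars.strip c) "finally".toList = false) :
    bStep ⟨out, f, BMode.body hdr⟩ c = bStep ⟨out, f, BMode.scan⟩ c := by
  simp only [bStep]
  rw [if_pos hc]

lemma bStep_body_cont (out : List (List Char)) (f : Bool) (hdr : Nat) (c : List Char)
    (hc : ¬ (PySem.Chars.strip c ≠ [] ∧ c.length - (pyLstripSpace c).length ≤ hdr ∧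
      PySem.Chars.startswith (PySem.Chars.strip c) "except".toList = false ∧
      PySem.Chars.startswith (PySem.Chars.strip c) "finally".toList = false)) :
    bStep ⟨out, f, BMode.body hdr⟩ c = ⟨out ++ [indLine c], f, BMode.body hdr⟩ := by
  simp only [bStep]
  rw [if_neg hc]
  unfold indLine
  by_cases hnb : PySem.Chars.strip c ≠ []
  · rw [if_pos hnb]
  · rw [if_neg hnb]

lemma body_fold_corr (orig : List (List Char)) (out : List (List Char)) (f : Bool)
    (hdr k : Nat) :
    List.foldl bStep ⟨out, f, BMode.body hdr⟩ (orig.drop k) =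
      (if bRegionEnd orig hdr k < orig.length then
        List.foldl bStep
          ⟨out ++ ((orig.drop k).take (bRegionEnd orig hdr k - k)).map indLine, f, BMode.scan⟩
          (orig.drop (bRegionEnd orig hdr k))
      else ⟨out ++ ((orig.drop k).take (bRegionEnd orig hdr k - k)).map indLine, f,
            BMode.body hdr⟩) := by
  by_cases hk : k < orig.length
  · by_cases hbrk : brkCond orig hdr k
    · rw [bRegionEnd_stop orig hdr k hk hbrk, if_pos hk]
      simp only [Nat.sub_self, List.take_zero, List.map_nil, List.append_nil]
      rw [drop_cons_getD orig k hk, List.foldl_cons, List.foldl_cons,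
        bStep_body_break out f hdr _ hbrk]
    · have hE : bRegionEnd orig hdr k = bRegionEnd orig hdr (k + 1) :=
        bRegionEnd_step orig hdr k hk hbrk
      have hE1 : k + 1 ≤ bRegionEnd orig hdr (k + 1) := bRegionEnd_le orig hdr (k + 1)
      rw [drop_cons_getD orig k hk, List.foldl_cons, bStep_body_cont out f hdr _ hbrk,
        body_fold_corr orig (out ++ [indLine (orig.getD k [])]) f hdr (k + 1), hE]
      have htake : (orig.getD k [] :: orig.drop (k + 1)).take (bRegionEnd orig hdr (k + 1) - k) =
          orig.getD k [] :: (orig.drop (k + 1)).take (bRegionEnd orig hdr (k + 1) - (k + 1)) := by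
        have : bRegionEnd orig hdr (k + 1) - k = (bRegionEnd orig hdr (k + 1) - (k + 1)) + 1 := by
          omega
        rw [this, List.take_succ_cons]
      rw [htake]
      simp
  · have hd : orig.drop k = [] := List.drop_eq_nil_of_le (by omega)
    rw [bRegionEnd_stopAll orig hdr k hk, if_neg hk, hd]
    simp

lemma bStep_pend_blank (out : List (List Char)) (f : Bool) (hdr : Nat) (c : List Char)
    (hb : PySem.Chars.strip c = []) :
    bStep ⟨out, f, BMode.pend hdr⟩ c = ⟨out ++ [c], f, BMode.pend hdr⟩ := by
  simp only [bStep]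
  rw [if_pos hb]

lemma bStep_pend_try (out : List (List Char)) (f : Bool) (hdr : Nat) (c : List Char)
    (hb : ¬ PySem.Chars.strip c = [])
    (ht : c.length - (pyLstripSpace c).length ≤ hdr ∧
      PySem.Chars.startswith (pyLstripSpace c) "try:".toList = true) :
    bStep ⟨out, f, BMode.pend hdr⟩ c = ⟨out ++ ["    ".toList ++ c], true, BMode.body hdr⟩ := by
  simp only [bStep]
  rw [if_neg hb, if_pos ht]

lemma bStep_pend_scan (out : List (List Char)) (f : Bool) (hdr : Nat) (c : List Char)
    (hb : ¬ PySem.Chars.strip c = [])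
    (ht : ¬ (c.length - (pyLstripSpace c).length ≤ hdr ∧
      PySem.Chars.startswith (pyLstripSpace c) "try:".toList = true)) :
    bStep ⟨out, f, BMode.pend hdr⟩ c = bStep ⟨out, f, BMode.scan⟩ c := by
  simp only [bStep]
  rw [if_neg hb, if_neg ht]

lemma bNextNonblank_step (orig : List (List Char)) (i : Nat) (hi : i < orig.length)
    (hb : PySem.Chars.strip (orig.getD i []) = []) :
    bNextNonblank orig i = bNextNonblank orig (i + 1) := by
  conv_lhs => rw [bNextNonblank]
  rw [dif_pos hi, if_pos hb]

lemma bNextNonblank_stop (orig : List (List Char)) (i : Nat)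
    (hb : ¬ PySem.Chars.strip (orig.getD i []) = []) :
    bNextNonblank orig i = i := by
  rw [bNextNonblank]
  by_cases hi : i < orig.length
  · rw [dif_pos hi, if_neg hb]
  · rw [dif_neg hi]

lemma pend_fold_corr (orig : List (List Char)) (out : List (List Char)) (f : Bool)
    (hdr i : Nat) :
    List.foldl bStep ⟨out, f, BMode.pend hdr⟩ (orig.drop i) =
      (if bNextNonblank orig i < orig.length then
        (if (orig.getD (bNextNonblank orig i) []).length -
              (pyLstripSpace (orig.getD (bNextNonblank orig i) [])).length ≤ hdr ∧
            PySem.Chars.startswith (pyLstripSpace (orig.getD (bNextNonblank orig i) []))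
              "try:".toList = true then
          List.foldl bStep
            ⟨out ++ (orig.drop i).take (bNextNonblank orig i - i) ++
               ["    ".toList ++ orig.getD (bNextNonblank orig i) []], true, BMode.body hdr⟩
            (orig.drop (bNextNonblank orig i + 1))
        else
          List.foldl bStep
            ⟨out ++ (orig.drop i).take (bNextNonblank orig i - i), f, BMode.scan⟩
            (orig.drop (bNextNonblank orig i)))
      else ⟨out ++ orig.drop i, f, BMode.pend hdr⟩) := by
  by_cases hi : i < orig.length
  · by_cases hb : PySem.Chars.strip (orig.getD i []) = []
    · have hj := bNextNonblank_step orig i hi hb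
      have hle : i + 1 ≤ bNextNonblank orig (i + 1) := bNextNonblank_le orig (i + 1)
      rw [drop_cons_getD orig i hi, List.foldl_cons, bStep_pend_blank out f hdr _ hb, hj,
        pend_fold_corr orig (out ++ [orig.getD i []]) f hdr (i + 1)]
      have htake : (orig.getD i [] :: orig.drop (i + 1)).take (bNextNonblank orig (i + 1) - i) =
          orig.getD i [] :: (orig.drop (i + 1)).take (bNextNonblank orig (i + 1) - (i + 1)) := by
        have : bNextNonblank orig (i + 1) - i = (bNextNonblank orig (i + 1) - (i + 1)) + 1 := by
          omega
        rw [this, List.take_succ_cons]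
      rw [htake]
      simp
    · have hj := bNextNonblank_stop orig i hb
      rw [hj, if_pos hi]
      by_cases htry : (orig.getD i []).length - (pyLstripSpace (orig.getD i [])).length ≤ hdr ∧
          PySem.Chars.startswith (pyLstripSpace (orig.getD i [])) "try:".toList = true
      · rw [if_pos htry]
        rw [drop_cons_getD orig i hi, List.foldl_cons, bStep_pend_try out f hdr _ hb htry]
        simp
      · rw [if_neg htry]
        rw [drop_cons_getD orig i hi, List.foldl_cons, List.foldl_cons,
          bStep_pend_scan out f hdr _ hb htry]
        simp
  · have hj : bNextNonblank orig i = i := by rw [bNextNonblank, dif_neg hi]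
    have hd : orig.drop i = [] := List.drop_eq_nil_of_le (by omega)
    rw [hj, if_neg (by omega : ¬ i < orig.length), hd]
    simp
termination_by orig.length - i
decreasing_by omega

lemma bStep_scan_hdr (out : List (List Char)) (f : Bool) (c : List Char)
    (hc : PySem.Chars.startswith (pyLstripSpace c) "if ".toList = true ∧
      PySem.Chars.endswith (PySem.Chars.rstrip (pyLstripSpace c)) ":".toList = true) :
    bStep ⟨out, f, BMode.scan⟩ c =
      ⟨out ++ [c], f, BMode.pend (c.length - (pyLstripSpace c).length)⟩ := by
  simp only [bStep]
  rw [if_pos hc]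

lemma bStep_scan_nohdr (out : List (List Char)) (f : Bool) (c : List Char)
    (hc : ¬ (PySem.Chars.startswith (pyLstripSpace c) "if ".toList = true ∧
      PySem.Chars.endswith (PySem.Chars.rstrip (pyLstripSpace c)) ":".toList = true)) :
    bStep ⟨out, f, BMode.scan⟩ c = ⟨out ++ [c], f, BMode.scan⟩ := by
  simp only [bStep]
  rw [if_neg hc]

lemma drop_split (orig : List (List Char)) (i j : Nat) (hij : i ≤ j) :
    orig.drop i = (orig.drop i).take (j - i) ++ orig.drop j := by
  conv_lhs => rw [← List.take_append_drop (j - i) (orig.drop i)]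
  congr 1
  rw [List.drop_drop]
  congr 1
  omega

lemma take_len (orig : List (List Char)) (i j : Nat) (_hij : i ≤ j) (hjn : j ≤ orig.length) :
    ((orig.drop i).take (j - i)).length = j - i := by
  simp
  omega

lemma set_at (out orig : List (List Char)) (j : Nat) (v : List Char)
    (hlen : out.length = j) (hj : j < orig.length) :
    (out ++ orig.drop j).set j v = (out ++ [v]) ++ orig.drop (j + 1) := by
  rw [drop_cons_getD orig j hj, ← hlen, set_boundary]

lemma aOuter_end (lines : List (List Char)) (mod : Bool) (n : Nat) :
    aOuter lines mod n n = (lines, mod) := by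
  rw [aOuter]
  dsimp only
  rw [dif_neg (lt_irrefl n)]

lemma main_corr (orig out : List (List Char)) (mod : Bool) (i : Nat)
    (hlen : out.length = i) (hin : i ≤ orig.length) :
    aOuter (out ++ orig.drop i) mod i orig.length =
      ((List.foldl bStep ⟨out, mod, BMode.scan⟩ (orig.drop i)).out,
       (List.foldl bStep ⟨out, mod, BMode.scan⟩ (orig.drop i)).found) := by
  rw [aOuter]
  dsimp only
  by_cases hi : i < orig.length
  · rw [dif_pos hi, getD_append_drop out orig i i hlen le_rfl]
    by_cases hhdr : PySem.Chars.startswith (pyLstripSpace (orig.getD i [])) "if ".toList = true ∧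
        PySem.Chars.endswith (PySem.Chars.rstrip (pyLstripSpace (orig.getD i []))) ":".toList = true
    · rw [if_pos hhdr, skip_eq out orig i (i + 1) hlen (by omega)]
      have hij : i + 1 ≤ bNextNonblank orig (i + 1) := bNextNonblank_le orig (i + 1)
      have hjn : bNextNonblank orig (i + 1) ≤ orig.length :=
        bNextNonblank_le_length orig (i + 1) (by omega)
      have hBfirst : List.foldl bStep ⟨out, mod, BMode.scan⟩ (orig.drop i) =
          List.foldl bStep ⟨out ++ [orig.getD i []], mod,
            BMode.pend ((orig.getD i []).length - (pyLstripSpace (orig.getD i [])).length)⟩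
            (orig.drop (i + 1)) := by
        rw [drop_cons_getD orig i hi, List.foldl_cons, bStep_scan_hdr out mod _ hhdr]
      have htake1 : (orig.drop i).take (bNextNonblank orig (i + 1) - i) =
          orig.getD i [] :: (orig.drop (i + 1)).take (bNextNonblank orig (i + 1) - (i + 1)) := by
        rw [drop_cons_getD orig i hi]
        have : bNextNonblank orig (i + 1) - i = (bNextNonblank orig (i + 1) - (i + 1)) + 1 := by
          omega
        rw [this, List.take_succ_cons]
      have hlen1 : (out ++ (orig.drop i).take (bNextNonblank orig (i + 1) - i)).length =
          bNextNonblank orig (i + 1) := by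
        rw [List.length_append, hlen, take_len orig i _ (by omega) hjn]
        omega
      have hblanks : ∀ t, i + 1 ≤ t → t < bNextNonblank orig (i + 1) →
          PySem.Chars.strip ((out ++ orig.drop i).getD t []) = [] := by
        intro t h1 h2
        rw [getD_append_drop out orig i t hlen (by omega)]
        exact bNextNonblank_blank orig (i + 1) t h1 h2
      by_cases hj : bNextNonblank orig (i + 1) < orig.length
      · rw [dif_pos hj, getD_append_drop out orig i _ hlen (by omega)]
        by_cases htry : (orig.getD (bNextNonblank orig (i + 1)) []).length -
              (pyLstripSpace (orig.getD (bNextNonblank orig (i + 1)) [])).length ≤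
              (orig.getD i []).length - (pyLstripSpace (orig.getD i [])).length ∧
            PySem.Chars.startswith (pyLstripSpace (orig.getD (bNextNonblank orig (i + 1)) []))
              "try:".toList = true
        · rw [if_pos htry]
          have hnbj : PySem.Chars.strip (orig.getD (bNextNonblank orig (i + 1)) []) ≠ [] :=
            bNextNonblank_nonblank orig (i + 1) hj
          have hE1 : bNextNonblank orig (i + 1) + 1 ≤
              bRegionEnd orig ((orig.getD i []).length - (pyLstripSpace (orig.getD i [])).length)
                (bNextNonblank orig (i + 1) + 1) :=
            bRegionEnd_le orig _ _
          have hEn : bRegionEnd orig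
                ((orig.getD i []).length - (pyLstripSpace (orig.getD i [])).length)
                (bNextNonblank orig (i + 1) + 1) ≤ orig.length :=
            bRegionEnd_le_length orig _ _ (by omega)
          -- A: unroll the first inner step (k = j: no break, indent the try line)
          have hstep : aInner (out ++ orig.drop i) (bNextNonblank orig (i + 1))
                ((orig.getD i []).length - (pyLstripSpace (orig.getD i [])).length)
                (bNextNonblank orig (i + 1)) orig.length =
              aInner (((out ++ (orig.drop i).take (bNextNonblank orig (i + 1) - i)) ++
                  ["    ".toList ++ orig.getD (bNextNonblank orig (i + 1)) []]) ++
                  orig.drop (bNextNonblank orig (i + 1) + 1))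
                (bNextNonblank orig (i + 1))
                ((orig.getD i []).length - (pyLstripSpace (orig.getD i [])).length)
                (bNextNonblank orig (i + 1) + 1) orig.length := by
            conv_lhs => rw [aInner]
            dsimp only
            rw [dif_pos hj, getD_append_drop out orig i _ hlen (by omega),
              if_neg (fun hc => lt_irrefl _ hc.1), if_pos hnbj]
            congr 1
            conv_lhs =>
              rw [drop_split orig i (bNextNonblank orig (i + 1)) (by omega),
                ← List.append_assoc]
            rw [set_at _ orig _ _ hlen1 hj]
          rw [hstep]
          rw [aInner_corr orig _ _ _ _
            (by simp only [List.length_append, List.length_take, List.length_drop,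
                  List.length_cons, List.length_nil]; omega)
            (by omega)]
          dsimp only
          rw [main_corr orig _ true _
            (by simp only [List.length_append, List.length_map, List.length_take,
                  List.length_drop, List.length_cons, List.length_nil]; omega)
            hEn]
          -- B side
          rw [hBfirst, pend_fold_corr, if_pos hj, if_pos htry, body_fold_corr]
          by_cases hElt : bRegionEnd orig
              ((orig.getD i []).length - (pyLstripSpace (orig.getD i [])).length)
              (bNextNonblank orig (i + 1) + 1) < orig.length
          · rw [if_pos hElt, htake1]
            simp
          · rw [if_neg hElt]
            have hEeq : bRegionEnd orig
                ((orig.getD i []).length - (pyLstripSpace (orig.getD i [])).length)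
                (bNextNonblank orig (i + 1) + 1) = orig.length := by omega
            rw [hEeq, List.drop_length, htake1]
            simp
        · rw [if_neg htry]
          have hskip : aOuter (out ++ orig.drop i) mod (i + 1) orig.length =
              aOuter (out ++ orig.drop i) mod (bNextNonblank orig (i + 1)) orig.length :=
            aOuter_skip_blanks _ mod (i + 1) _ orig.length hij hjn hblanks
          rw [hskip]
          conv_lhs =>
            rw [drop_split orig i (bNextNonblank orig (i + 1)) (by omega), ← List.append_assoc]
          rw [main_corr orig _ mod _ hlen1 hjn]
          rw [hBfirst, pend_fold_corr, if_pos hj, if_neg htry, htake1]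
          simp
      · rw [dif_neg hj]
        have hjeq : bNextNonblank orig (i + 1) = orig.length := by omega
        have hskip : aOuter (out ++ orig.drop i) mod (i + 1) orig.length =
            aOuter (out ++ orig.drop i) mod orig.length orig.length := by
          have h := aOuter_skip_blanks (out ++ orig.drop i) mod (i + 1)
            (bNextNonblank orig (i + 1)) orig.length hij hjn hblanks
          rw [hjeq] at h
          exact h
        rw [hskip, aOuter_end, hBfirst, pend_fold_corr, if_neg hj]
        rw [drop_cons_getD orig i hi]
        simp
    · rw [if_neg hhdr]
      have hB : List.foldl bStep ⟨out, mod, BMode.scan⟩ (orig.drop i) =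
          List.foldl bStep ⟨out ++ [orig.getD i []], mod, BMode.scan⟩ (orig.drop (i + 1)) := by
        rw [drop_cons_getD orig i hi, List.foldl_cons, bStep_scan_nohdr out mod _ hhdr]
      conv_lhs => rw [drop_cons_getD orig i hi]
      have hassoc : out ++ orig.getD i [] :: orig.drop (i + 1) =
          (out ++ [orig.getD i []]) ++ orig.drop (i + 1) := by simp
      rw [hassoc, main_corr orig _ mod (i + 1) (by simp [hlen]) hi, hB]
  · rw [dif_neg hi]
    have hd : orig.drop i = [] := List.drop_eq_nil_of_le (by omega)
    rw [hd]
    simp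
termination_by orig.length - i
decreasing_by all_goals omega

-- ===== VERDICT (by name: the statement is the Claim_ definition above) =====
theorem fix_if_try_indent_py_spec : Claim_equal_fix_if_try_indent_py := by
  unfold Claim_equal_fix_if_try_indent_py Spec_fix_if_try_indent_py
  intro s _
  simp only [fix_if_try_indent_py, fix_if_try_indent_py_alt]
  have h := main_corr (PySem.Chars.splitlines s.toList) [] false 0 rfl (Nat.zero_le _)
  simp only [List.nil_append, List.drop_zero] at h
  rw [h]
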